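-- pv_equiv track=rewrite | github.com/hartmaj2/plat-arch-solids-coloring | Code/set_partitions.py | try_unify_by_aut
-- ===== SOURCE A (Python) =====
-- def try_unify_by_aut(c1 : list[int], c2 : list[int], a : list[tuple], num_clrs : int) -> tuple | None:
--     img = [-1] * num_clrs # -1 means mapped to no color yet
--     preimg = [-1] * num_clrs # -1 means no color mapped to this yet
--     for cycle in a:
--         k = len(cycle)
--         for i in range(k):
--             vtx_preim = cycle[i]
--             vtx_img = cycle[(i+1)%k]
--             b1 = c1[vtx_preim]
--             b2 = c2[vtx_img]
--             if img[b1] == -1: # b1 not mapped to anything yet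
--                 if preimg[b2] != -1: # some other color has already mapped to b2
--                     return None
--                 else: # we can map b1 -> b2
--                     img[b1] = b2
--                     preimg[b2] = b1
--             else:
--                 if img[b1] != b2: # we have already mapped to some other color so we cannot map to this one as well
--                     return None
--     return tuple(img)
-- ===== SOURCE B (Python) =====
-- def try_unify_by_aut(c1, c2, a, num_clrs):
--     mapping = {}
--     for cycle in a:
--         k = len(cycle)
--         for i in range(k):
--             b1 = c1[cycle[i]]
--             b2 = c2[cycle[(i + 1) % k]]
--             if mapping.setdefault(b1, b2) != b2:
--                 return None
--     seen = set()
--     for t in mapping.values():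
--         if t in seen:
--             return None
--         seen.add(t)
--     return tuple(mapping.get(b, -1) for b in range(num_clrs))
-- ===== Notes on version B (the rewrite author's own statement) =====
-- stated objective: alternative
-- what changed: Replaces A's two sentinel arrays (img/preimg) and in-loop preimage bookkeeping by a partial color map built with dict.setdefault, a separate injectivity scan of the map's values against a seen-set, and a final comprehension materialising the tuple over range(num_clrs).
-- outside the precondition, e.g. on try_unify_by_aut([0, 1], [0, 0], [(0, 1), (5,)], 2): A returns None, B raises IndexError; on try_unify_by_aut([0, 0], [-1, 1], [(0,), (1,)], 3): A returns (1, -1, -1), B returns None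
import Mathlib
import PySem

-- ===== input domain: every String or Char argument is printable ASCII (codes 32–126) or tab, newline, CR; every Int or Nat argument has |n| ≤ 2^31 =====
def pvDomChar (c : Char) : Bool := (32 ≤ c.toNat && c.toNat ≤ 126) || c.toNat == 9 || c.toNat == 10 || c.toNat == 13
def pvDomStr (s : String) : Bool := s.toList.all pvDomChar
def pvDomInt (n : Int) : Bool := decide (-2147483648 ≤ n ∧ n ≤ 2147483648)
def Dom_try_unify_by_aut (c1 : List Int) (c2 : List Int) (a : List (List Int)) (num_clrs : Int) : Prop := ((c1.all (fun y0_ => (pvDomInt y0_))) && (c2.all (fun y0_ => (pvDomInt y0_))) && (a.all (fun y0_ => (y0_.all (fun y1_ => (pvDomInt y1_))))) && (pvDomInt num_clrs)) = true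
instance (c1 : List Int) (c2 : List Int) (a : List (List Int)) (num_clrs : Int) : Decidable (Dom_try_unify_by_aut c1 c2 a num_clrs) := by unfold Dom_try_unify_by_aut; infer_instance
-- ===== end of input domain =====

-- B replaces A's img/preimg sentinel arrays by a partial color map (dict) built with setdefault, an
-- injectivity scan of its values against a 'seen' set, and a final comprehension over range(num_clrs);
-- objective: simpler/alternative decomposition, same asymptotic cost.

-- ===== PORT A =====
-- A's inner loop 'for i in range(k)'; state (img, preimg); 'none' = Python 'return None'.
-- Out-of-range lookups/stores (excluded by Pre_) use the total pyGetD/pySetD forms.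
def tuaInner (c1 c2 cycle : List Int) (k : Nat) :
    List Nat → List Int × List Int → Option (List Int × List Int)
  | [], st => some st
  | i :: is, (img, pre) =>
    let vtx_preim := PySem.List.pyGetD cycle (i : Int) 0
    let vtx_img := PySem.List.pyGetD cycle (((i + 1) % k : Nat) : Int) 0
    let b1 := PySem.List.pyGetD c1 vtx_preim 0
    let b2 := PySem.List.pyGetD c2 vtx_img 0
    if PySem.List.pyGetD img b1 (-1) = -1 then
      if PySem.List.pyGetD pre b2 (-1) ≠ -1 then none
      else tuaInner c1 c2 cycle k is (PySem.List.pySetD img b1 b2, PySem.List.pySetD pre b2 b1)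
    else
      if PySem.List.pyGetD img b1 (-1) ≠ b2 then none
      else tuaInner c1 c2 cycle k is (img, pre)

def tuaOuter (c1 c2 : List Int) : List (List Int) → List Int × List Int → Option (List Int × List Int)
  | [], st => some st
  | cyc :: rest, st =>
    match tuaInner c1 c2 cyc cyc.length (List.range cyc.length) st with
    | none => none
    | some st' => tuaOuter c1 c2 rest st'

def try_unify_by_aut (c1 : List Int) (c2 : List Int) (a : List (List Int)) (num_clrs : Int) : Option (List Int) :=
  match tuaOuter c1 c2 a
      (List.replicate num_clrs.toNat (-1), List.replicate num_clrs.toNat (-1)) with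
  | none => none
  | some st => some st.1

-- ===== PORT B =====
-- B's inner loop: 'if mapping.setdefault(b1, b2) != b2: return None' (match = the setdefault).
def tubInner (c1 c2 cycle : List Int) (k : Nat) :
    List Nat → PySem.Dict Int Int → Option (PySem.Dict Int Int)
  | [], m => some m
  | i :: is, m =>
    let b1 := PySem.List.pyGetD c1 (PySem.List.pyGetD cycle (i : Int) 0) 0
    let b2 := PySem.List.pyGetD c2 (PySem.List.pyGetD cycle (((i + 1) % k : Nat) : Int) 0) 0
    match m.get? b1 with
    | some w => if w ≠ b2 then none else tubInner c1 c2 cycle k is m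
    | none => tubInner c1 c2 cycle k is (m.insert b1 b2)

def tubOuter (c1 c2 : List Int) : List (List Int) → PySem.Dict Int Int → Option (PySem.Dict Int Int)
  | [], m => some m
  | cyc :: rest, m =>
    match tubInner c1 c2 cyc cyc.length (List.range cyc.length) m with
    | none => none
    | some m' => tubOuter c1 c2 rest m'

-- B's injectivity scan: 'for t in mapping.values(): if t in seen: return None; seen.add(t)'.
def tubScan : List Int → PySem.Set Int → Bool
  | [], _ => true
  | t :: ts, seen =>
    if PySem.Set.contains seen t then false else tubScan ts (PySem.Set.add seen t)

def try_unify_by_aut_alt (c1 : List Int) (c2 : List Int) (a : List (List Int)) (num_clrs : Int) : Option (List Int) :=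
  match tubOuter c1 c2 a PySem.Dict.empty with
  | none => none
  | some m =>
    if tubScan (PySem.Dict.values m) PySem.Set.empty then
      some ((PySem.List.pyRange 0 num_clrs 1).map (fun b => PySem.Dict.getD m b (-1)))
    else none

-- ===== PRECONDITION & SPEC =====
-- Pre_ requires every cycle vertex to be a valid index into c1 and c2 and both colors it selects to
-- lie in [0, num_clrs), even when A's early 'return None' precedes the offending lookup: outside
-- that, A may raise IndexError, and on negative colors A's -1 'unmapped' sentinel collides with real
-- color values, making its value an accident of A's implementation.
def Pre_try_unify_by_aut (c1 : List Int) (c2 : List Int) (a : List (List Int)) (num_clrs : Int) : Prop :=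
  ∀ cyc ∈ a, ∀ v ∈ cyc, (PySem.Raise.InRange c1.length v ∧ PySem.Raise.InRange c2.length v) ∧
    (0 ≤ PySem.List.pyGetD c1 v 0 ∧ PySem.List.pyGetD c1 v 0 < num_clrs) ∧
    (0 ≤ PySem.List.pyGetD c2 v 0 ∧ PySem.List.pyGetD c2 v 0 < num_clrs)
instance (c1 : List Int) (c2 : List Int) (a : List (List Int)) (num_clrs : Int) : Decidable (Pre_try_unify_by_aut c1 c2 a num_clrs) := by unfold Pre_try_unify_by_aut; infer_instance

def pvWitness_try_unify_by_aut : List Int × List Int × List (List Int) × Int :=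
  ([0, 1], [1, 0], [[0, 1]], 2)

def Spec_try_unify_by_aut (c1 : List Int) (c2 : List Int) (a : List (List Int)) (num_clrs : Int) (out : Option (List Int)) : Prop := out = try_unify_by_aut_alt c1 c2 a num_clrs
instance (c1 : List Int) (c2 : List Int) (a : List (List Int)) (num_clrs : Int) (out : Option (List Int)) : Decidable (Spec_try_unify_by_aut c1 c2 a num_clrs out) := by unfold Spec_try_unify_by_aut; infer_instance

-- ===== CLAIM (what is proved, stated in full; the proofs are below) =====
def Claim_equal_try_unify_by_aut : Prop := ∀ (c1 : List Int) (c2 : List Int) (a : List (List Int)) (num_clrs : Int), Dom_try_unify_by_aut c1 c2 a num_clrs → Pre_try_unify_by_aut c1 c2 a num_clrs → Spec_try_unify_by_aut c1 c2 a num_clrs (try_unify_by_aut c1 c2 a num_clrs)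

-- ===== LEMMAS AND PROOFS =====

-- Correspondence between A's state (img, preimg) and B's mapping m.
def Corr (nc : Int) (img pre : List Int) (m : PySem.Dict Int Int) : Prop :=
  img.length = nc.toNat ∧ pre.length = nc.toNat ∧
  (∀ b : Nat, b < nc.toNat → img.getD b (-1) = m.getD (b : Int) (-1)) ∧
  (∀ p ∈ m.items, (0 ≤ p.1 ∧ p.1 < nc) ∧ (0 ≤ p.2 ∧ p.2 < nc)) ∧
  (∀ t : Nat, t < nc.toNat → (pre.getD t (-1) = -1 ↔ (t : Int) ∉ m.values)) ∧
  m.values.Nodup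

theorem tubScan_true_iff (ts : List Int) : ∀ seen : PySem.Set Int,
    tubScan ts seen = true ↔ (ts.Nodup ∧ ∀ t ∈ ts, t ∉ seen) := by
  induction ts with
  | nil => intro seen; simp [tubScan]
  | cons t ts ih =>
    intro seen
    by_cases h : t ∈ seen
    · simp only [tubScan, List.nodup_cons]
      rw [if_pos (by simpa [PySem.Set.contains] using h)]
      simp only [Bool.false_eq_true, false_iff]
      intro hcon
      exact absurd h (hcon.2 t (by simp))
    · simp only [tubScan, List.nodup_cons]
      rw [if_neg (by simpa [PySem.Set.contains] using h)]
      rw [ih]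
      constructor
      · rintro ⟨hn, hall⟩
        have hts : t ∉ ts := fun hmem => (hall t hmem) (by simp [PySem.Set.mem_add])
        refine ⟨⟨hts, hn⟩, ?_⟩
        intro u hu
        rcases List.mem_cons.mp hu with rfl | hu'
        · exact h
        · exact fun hs => (hall u hu') (by simp [PySem.Set.mem_add, hs])
      · rintro ⟨⟨hts, hn⟩, hall⟩
        refine ⟨hn, ?_⟩
        intro u hu hs
        rcases (by simpa [PySem.Set.mem_add] using hs : u ∈ seen ∨ u = t) with hs' | rfl
        · exact hall u (List.mem_cons_of_mem _ hu) hs'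
        · exact hts hu

theorem get?_some_mem_items {m : PySem.Dict Int Int} {k w : Int}
    (h : m.get? k = some w) : ∃ p ∈ m.items, p.2 = w := by
  unfold PySem.Dict.get? at h
  cases hf : m.items.find? (fun p => p.1 == k) with
  | none => rw [hf] at h; simp at h
  | some p =>
    rw [hf] at h
    simp only [Option.map_some, Option.some.injEq] at h
    exact ⟨p, List.mem_of_find?_eq_some hf, h⟩

theorem tubInner_values_prefix (c1 c2 cyc : List Int) (k : Nat) :
    ∀ (is : List Nat) (m m' : PySem.Dict Int Int),
      tubInner c1 c2 cyc k is m = some m' → ∃ ex, m'.values = m.values ++ ex := by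
  intro is
  induction is with
  | nil => intro m m' h; exact ⟨[], by simp [tubInner] at h; simp [h]⟩
  | cons i is ih =>
    intro m m' h
    simp only [tubInner] at h
    cases hq : m.get? (PySem.List.pyGetD c1 (PySem.List.pyGetD cyc (i : Int) 0) 0) with
    | some w =>
      rw [hq] at h
      replace h : (if w ≠ PySem.List.pyGetD c2 (PySem.List.pyGetD cyc ((((i + 1) % k : Nat)) : Int) 0) 0
          then none else tubInner c1 c2 cyc k is m) = some m' := h
      split_ifs at h with hw
      exact ih m m' h
    | none =>
      rw [hq] at h
      replace h : tubInner c1 c2 cyc k is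
          ((m.insert (PySem.List.pyGetD c1 (PySem.List.pyGetD cyc (i : Int) 0) 0)
            (PySem.List.pyGetD c2 (PySem.List.pyGetD cyc ((((i + 1) % k : Nat)) : Int) 0) 0))) = some m' := h
      obtain ⟨ex, hex⟩ := ih _ _ h
      have hcont : m.contains _ = false := (PySem.Dict.get?_eq_none_iff_contains m _).mp hq
      refine ⟨(PySem.List.pyGetD c2 (PySem.List.pyGetD cyc ((((i + 1) % k : Nat)) : Int) 0) 0) :: ex, ?_⟩
      rw [hex]
      simp only [PySem.Dict.values, PySem.Dict.items_insert_of_not_contains m _ hcont,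
        List.map_append]
      simp

theorem tubInner_bad (c1 c2 cyc : List Int) (k : Nat) (is : List Nat)
    (m m' : PySem.Dict Int Int) (h : tubInner c1 c2 cyc k is m = some m')
    (hbad : ¬ m.values.Nodup) : ¬ m'.values.Nodup := by
  obtain ⟨ex, hex⟩ := tubInner_values_prefix c1 c2 cyc k is m m' h
  rw [hex]
  intro hn
  exact hbad (List.nodup_append.mp hn).1

theorem tubOuter_bad (c1 c2 : List Int) :
    ∀ (rest : List (List Int)) (m m' : PySem.Dict Int Int),
      tubOuter c1 c2 rest m = some m' → ¬ m.values.Nodup → ¬ m'.values.Nodup := by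
  intro rest
  induction rest with
  | nil => intro m m' h hbad; simp [tubOuter] at h; simpa [← h] using hbad
  | cons cyc rest ih =>
    intro m m' h hbad
    simp only [tubOuter] at h
    cases hq : tubInner c1 c2 cyc cyc.length (List.range cyc.length) m with
    | none => rw [hq] at h; simp at h
    | some m1 =>
      rw [hq] at h
      exact ih m1 m' h (tubInner_bad _ _ _ _ _ _ _ hq hbad)

theorem inner_rel (c1 c2 cyc : List Int) (nc : Int)
    (hcyc : ∀ v ∈ cyc, (PySem.Raise.InRange c1.length v ∧ PySem.Raise.InRange c2.length v) ∧
      (0 ≤ PySem.List.pyGetD c1 v 0 ∧ PySem.List.pyGetD c1 v 0 < nc) ∧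
      (0 ≤ PySem.List.pyGetD c2 v 0 ∧ PySem.List.pyGetD c2 v 0 < nc)) :
    ∀ (is : List Nat), (∀ i ∈ is, i < cyc.length) → ∀ img pre m, Corr nc img pre m →
      (tuaInner c1 c2 cyc cyc.length is (img, pre) = none →
        tubInner c1 c2 cyc cyc.length is m = none ∨
          ∃ m', tubInner c1 c2 cyc cyc.length is m = some m' ∧ ¬ m'.values.Nodup) ∧
      (∀ img' pre', tuaInner c1 c2 cyc cyc.length is (img, pre) = some (img', pre') →
        ∃ m', tubInner c1 c2 cyc cyc.length is m = some m' ∧ Corr nc img' pre' m') := by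
  intro is
  induction is with
  | nil =>
    intro _ img pre m hC
    constructor
    · intro h; simp [tuaInner] at h
    · intro img' pre' h
      simp only [tuaInner, Option.some.injEq, Prod.mk.injEq] at h
      exact ⟨m, by simp [tubInner], h.1 ▸ h.2 ▸ hC⟩
  | cons i is ih =>
    intro his img pre m hC
    obtain ⟨hlenI, hlenP, hI1, hI2, hI3, hI4⟩ := hC
    have hik : i < cyc.length := his i (by simp)
    have hkpos : 0 < cyc.length := by omega
    have hi2k : (i + 1) % cyc.length < cyc.length := Nat.mod_lt _ hkpos
    -- the two vertices and the two colors
    set v1 := PySem.List.pyGetD cyc (i : Int) 0 with hv1def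
    set v2 := PySem.List.pyGetD cyc ((((i + 1) % cyc.length : Nat)) : Int) 0 with hv2def
    have hv1mem : v1 ∈ cyc :=
      PySem.List.pyGetD_mem _ _ (by simp only [PySem.Raise.InRange]; omega)
    have hv2mem : v2 ∈ cyc :=
      PySem.List.pyGetD_mem _ _ (by simp only [PySem.Raise.InRange]; omega)
    set b1 := PySem.List.pyGetD c1 v1 0 with hb1def
    set b2 := PySem.List.pyGetD c2 v2 0 with hb2def
    have hb1 : 0 ≤ b1 ∧ b1 < nc := (hcyc v1 hv1mem).2.1
    have hb2 : 0 ≤ b2 ∧ b2 < nc := (hcyc v2 hv2mem).2.2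
    have hb1n : b1.toNat < nc.toNat := by omega
    have hb2n : b2.toNat < nc.toNat := by omega
    have hb1cast : ((b1.toNat : Nat) : Int) = b1 := Int.toNat_of_nonneg hb1.1
    have hb2cast : ((b2.toNat : Nat) : Int) = b2 := Int.toNat_of_nonneg hb2.1
    -- A's img read equals B's dict read
    have hreadA : PySem.List.pyGetD img b1 (-1) = (m.get? b1).getD (-1) := by
      conv_lhs => rw [← hb1cast]
      rw [PySem.List.pyGetD_natCast, hI1 b1.toNat hb1n, hb1cast,
        PySem.Dict.getD_eq_get?_getD]
    have hreadP : PySem.List.pyGetD pre b2 (-1) = pre.getD b2.toNat (-1) := by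
      conv_lhs => rw [← hb2cast]
      rw [PySem.List.pyGetD_natCast]
    -- one unfolding step of the two loops
    have hstepA : tuaInner c1 c2 cyc cyc.length (i :: is) (img, pre) =
        (if PySem.List.pyGetD img b1 (-1) = -1 then
          if PySem.List.pyGetD pre b2 (-1) ≠ -1 then none
          else tuaInner c1 c2 cyc cyc.length is
            (PySem.List.pySetD img b1 b2, PySem.List.pySetD pre b2 b1)
        else
          if PySem.List.pyGetD img b1 (-1) ≠ b2 then none
          else tuaInner c1 c2 cyc cyc.length is (img, pre)) := rfl
    have hstepB : tubInner c1 c2 cyc cyc.length (i :: is) m =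
        (match m.get? b1 with
        | some w => if w ≠ b2 then none else tubInner c1 c2 cyc cyc.length is m
        | none => tubInner c1 c2 cyc cyc.length is (m.insert b1 b2)) := rfl
    cases hq : m.get? b1 with
    | some w =>
      -- b1 already mapped: A sees w (≥ 0, so ≠ -1)
      obtain ⟨p, hpmem, hpw⟩ := get?_some_mem_items hq
      have hw0 : 0 ≤ w := hpw ▸ (hI2 p hpmem).2.1
      have hwA : PySem.List.pyGetD img b1 (-1) = w := by rw [hreadA, hq]; rfl
      by_cases hwb : w = b2
      · -- both loops continue with unchanged state
        have hA : tuaInner c1 c2 cyc cyc.length (i :: is) (img, pre) =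
            tuaInner c1 c2 cyc cyc.length is (img, pre) := by
          rw [hstepA, if_neg (by omega), if_neg (by simp [hwA, hwb])]
        have hB : tubInner c1 c2 cyc cyc.length (i :: is) m =
            tubInner c1 c2 cyc cyc.length is m := by
          rw [hstepB, hq]; simp [hwb]
        have := ih (fun j hj => his j (by simp [hj])) img pre m
          ⟨hlenI, hlenP, hI1, hI2, hI3, hI4⟩
        rw [hA, hB]
        exact this
      · -- conflict: both return None
        have hA : tuaInner c1 c2 cyc cyc.length (i :: is) (img, pre) = none := by
          rw [hstepA, if_neg (by omega), if_pos (by simp [hwA, hwb])]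
        have hB : tubInner c1 c2 cyc cyc.length (i :: is) m = none := by
          rw [hstepB, hq]; simp [hwb]
        constructor
        · intro _; exact Or.inl hB
        · intro img' pre' h; rw [hA] at h; exact absurd h (by simp)
    | none =>
      -- b1 unmapped: A sees -1
      have hwA : PySem.List.pyGetD img b1 (-1) = -1 := by rw [hreadA, hq]; rfl
      have hB : tubInner c1 c2 cyc cyc.length (i :: is) m =
          tubInner c1 c2 cyc cyc.length is (m.insert b1 b2) := by rw [hstepB, hq]
      have hcont : m.contains b1 = false := (PySem.Dict.get?_eq_none_iff_contains m b1).mp hq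
      have hitems : (m.insert b1 b2).items = m.items ++ [(b1, b2)] :=
        PySem.Dict.items_insert_of_not_contains m b2 hcont
      have hvals : (m.insert b1 b2).values = m.values ++ [b2] := by
        simp [PySem.Dict.values, hitems]
      by_cases hpre : pre.getD b2.toNat (-1) = -1
      · -- b2 not yet an image: A maps b1 -> b2, B inserts
        have hnmem : b2 ∉ m.values := by
          have := (hI3 b2.toNat hb2n).mp hpre
          rwa [hb2cast] at this
        have hA : tuaInner c1 c2 cyc cyc.length (i :: is) (img, pre) =
            tuaInner c1 c2 cyc cyc.length is
              (PySem.List.pySetD img b1 b2, PySem.List.pySetD pre b2 b1) := by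
          rw [hstepA, if_pos hwA, if_neg (by rw [hreadP, hpre]; simp)]
        -- the new states still correspond
        have hC' : Corr nc (PySem.List.pySetD img b1 b2) (PySem.List.pySetD pre b2 b1)
            (m.insert b1 b2) := by
          rw [PySem.List.pySetD_of_nonneg _ _ hb1.1, PySem.List.pySetD_of_nonneg _ _ hb2.1]
          refine ⟨by simp [hlenI], by simp [hlenP], ?_, ?_, ?_, ?_⟩
          · intro b hb
            rw [PySem.Dict.getD_insert]
            by_cases hbb : b = b1.toNat
            · subst hbb
              rw [if_pos hb1cast]
              simp [List.getD, hlenI, hb1n]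
            · rw [if_neg (by omega)]
              have : (img.set b1.toNat b2).getD b (-1) = img.getD b (-1) := by
                simp only [List.getD_eq_getElem?_getD, List.getElem?_set]
                rw [if_neg (by omega : ¬ b1.toNat = b)]
              rw [this]; exact hI1 b hb
          · intro p hp
            rw [hitems] at hp
            rcases List.mem_append.mp hp with hp' | hp'
            · exact hI2 p hp'
            · have : p = (b1, b2) := by simpa using hp'
              subst this; exact ⟨hb1, hb2⟩
          · intro t ht
            rw [hvals]
            by_cases htt : t = b2.toNat
            · subst htt
              have hL : (pre.set b2.toNat b1).getD b2.toNat (-1) = b1 := by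
                simp [List.getD, hlenP, hb2n]
              rw [hL]
              simp only [List.mem_append, List.mem_singleton]
              constructor
              · intro h; omega
              · intro h; exact absurd (Or.inr hb2cast) h
            · have hL : (pre.set b2.toNat b1).getD t (-1) = pre.getD t (-1) := by
                simp only [List.getD_eq_getElem?_getD, List.getElem?_set]
                rw [if_neg (by omega : ¬ b2.toNat = t)]
              rw [hL]
              have htb2 : (t : Int) ≠ b2 := by omega
              simp only [List.mem_append, List.mem_singleton]
              rw [hI3 t ht]
              constructor
              · intro h hmem; rcases hmem with h' | h' <;> [exact h h'; exact htb2 h']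
              · intro h; exact fun h' => h (Or.inl h')
          · rw [hvals]
            exact List.nodup_append.mpr ⟨hI4, List.nodup_singleton _,
              fun x hx y hy => by simp at hy; subst hy; exact fun h => hnmem (h ▸ hx)⟩
        rw [hA, hB]
        exact ih (fun j hj => his j (by simp [hj])) _ _ _ hC'
      · -- b2 already an image of some other color: A returns None, B's map goes non-injective
        have hmem : b2 ∈ m.values := by
          by_contra hx
          exact hpre ((hI3 b2.toNat hb2n).mpr (by rwa [hb2cast]))
        have hA : tuaInner c1 c2 cyc cyc.length (i :: is) (img, pre) = none := by
          rw [hstepA, if_pos hwA, if_pos (by rw [hreadP]; exact hpre)]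
        have hbad : ¬ (m.insert b1 b2).values.Nodup := by
          rw [hvals]
          intro hn
          exact (List.nodup_append.mp hn).2.2 b2 hmem b2 (by simp) rfl
        constructor
        · intro _
          rw [hB]
          cases hr : tubInner c1 c2 cyc cyc.length is (m.insert b1 b2) with
          | none => exact Or.inl rfl
          | some m' =>
            exact Or.inr ⟨m', rfl, tubInner_bad _ _ _ _ _ _ _ hr hbad⟩
        · intro img' pre' h; rw [hA] at h; exact absurd h (by simp)

theorem outer_rel (c1 c2 : List Int) (nc : Int) :
    ∀ (rest : List (List Int)),
      (∀ cyc ∈ rest, ∀ v ∈ cyc,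
        (PySem.Raise.InRange c1.length v ∧ PySem.Raise.InRange c2.length v) ∧
        (0 ≤ PySem.List.pyGetD c1 v 0 ∧ PySem.List.pyGetD c1 v 0 < nc) ∧
        (0 ≤ PySem.List.pyGetD c2 v 0 ∧ PySem.List.pyGetD c2 v 0 < nc)) →
      ∀ img pre m, Corr nc img pre m →
      (tuaOuter c1 c2 rest (img, pre) = none →
        tubOuter c1 c2 rest m = none ∨
          ∃ m', tubOuter c1 c2 rest m = some m' ∧ ¬ m'.values.Nodup) ∧
      (∀ img' pre', tuaOuter c1 c2 rest (img, pre) = some (img', pre') →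
        ∃ m', tubOuter c1 c2 rest m = some m' ∧ Corr nc img' pre' m') := by
  intro rest
  induction rest with
  | nil =>
    intro _ img pre m hC
    constructor
    · intro h; simp [tuaOuter] at h
    · intro img' pre' h
      simp only [tuaOuter, Option.some.injEq, Prod.mk.injEq] at h
      exact ⟨m, by simp [tubOuter], h.1 ▸ h.2 ▸ hC⟩
  | cons cyc rest ih =>
    intro hcyc img pre m hC
    have hinner := inner_rel c1 c2 cyc nc (hcyc cyc (by simp))
      (List.range cyc.length) (fun i hi => List.mem_range.mp hi) img pre m hC
    have hstepA : tuaOuter c1 c2 (cyc :: rest) (img, pre) =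
        (match tuaInner c1 c2 cyc cyc.length (List.range cyc.length) (img, pre) with
        | none => none
        | some st' => tuaOuter c1 c2 rest st') := rfl
    have hstepB : tubOuter c1 c2 (cyc :: rest) m =
        (match tubInner c1 c2 cyc cyc.length (List.range cyc.length) m with
        | none => none
        | some m' => tubOuter c1 c2 rest m') := rfl
    cases hA1 : tuaInner c1 c2 cyc cyc.length (List.range cyc.length) (img, pre) with
    | none =>
      have hAo : tuaOuter c1 c2 (cyc :: rest) (img, pre) = none := by rw [hstepA, hA1]
      rcases hinner.1 hA1 with hB1 | ⟨m1, hB1, hbad⟩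
      · constructor
        · intro _; exact Or.inl (by rw [hstepB, hB1])
        · intro img' pre' h; rw [hAo] at h; exact absurd h (by simp)
      · constructor
        · intro _
          rw [hstepB, hB1]
          show tubOuter c1 c2 rest m1 = none ∨
            ∃ m', tubOuter c1 c2 rest m1 = some m' ∧ ¬ m'.values.Nodup
          cases hr : tubOuter c1 c2 rest m1 with
          | none => exact Or.inl rfl
          | some m' => exact Or.inr ⟨m', rfl, tubOuter_bad c1 c2 rest m1 m' hr hbad⟩
        · intro img' pre' h; rw [hAo] at h; exact absurd h (by simp)
    | some st1 =>
      obtain ⟨img1, pre1⟩ := st1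
      obtain ⟨m1, hB1, hC1⟩ := hinner.2 img1 pre1 hA1
      have hrec := ih (fun c hc => hcyc c (by simp [hc])) img1 pre1 m1 hC1
      rw [hstepA, hA1, hstepB, hB1]
      exact hrec

theorem corr_init (nc : Int) :
    Corr nc (List.replicate nc.toNat (-1)) (List.replicate nc.toNat (-1)) PySem.Dict.empty := by
  refine ⟨by simp, by simp, ?_, ?_, ?_, ?_⟩
  · intro b hb
    rw [PySem.Dict.getD_empty]
    simp [List.getD, hb]
  · intro p hp; simp [PySem.Dict.empty] at hp
  · intro t ht
    simp [List.getD, ht, PySem.Dict.values, PySem.Dict.empty]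
  · simp [PySem.Dict.values, PySem.Dict.empty]

theorem pyRange_neg (nc : Int) (h : ¬ 0 ≤ nc) : PySem.List.pyRange 0 nc 1 = [] := by
  have h1 : ¬ (0 : Int) < nc := by omega
  simp [PySem.List.pyRange, h1]

-- ===== VERDICT (by name: the statement is the Claim_ definition above) =====
theorem try_unify_by_aut_spec : Claim_equal_try_unify_by_aut := by
  unfold Claim_equal_try_unify_by_aut
  intro c1 c2 a nc _ hcyc
  unfold Spec_try_unify_by_aut
  have H := outer_rel c1 c2 nc a hcyc
    (List.replicate nc.toNat (-1)) (List.replicate nc.toNat (-1)) PySem.Dict.empty (corr_init nc)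
  unfold try_unify_by_aut try_unify_by_aut_alt
  cases hA : tuaOuter c1 c2 a
      (List.replicate nc.toNat (-1), List.replicate nc.toNat (-1)) with
  | none =>
    rcases H.1 hA with hB | ⟨m', hB, hbad⟩
    · rw [hB]
    · rw [hB]
      have hscan : tubScan (PySem.Dict.values m') PySem.Set.empty = false := by
        cases hs : tubScan (PySem.Dict.values m') PySem.Set.empty with
        | false => rfl
        | true => exact absurd ((tubScan_true_iff _ _).mp hs).1 hbad
      show none = (if tubScan (PySem.Dict.values m') PySem.Set.empty then
        some ((PySem.List.pyRange 0 nc 1).map (fun b => PySem.Dict.getD m' b (-1))) else none)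
      simp only [hscan]
      simp
  | some st =>
    obtain ⟨img, pre⟩ := st
    obtain ⟨m', hB, hC⟩ := H.2 img pre hA
    rw [hB]
    have hscan : tubScan (PySem.Dict.values m') PySem.Set.empty = true :=
      (tubScan_true_iff _ _).mpr ⟨hC.2.2.2.2.2, by intro t _ hx; simp [PySem.Set.empty] at hx⟩
    show some img = (if tubScan (PySem.Dict.values m') PySem.Set.empty then
      some ((PySem.List.pyRange 0 nc 1).map (fun b => PySem.Dict.getD m' b (-1))) else none)
    simp only [hscan, if_true]
    refine congrArg some ?_
    by_cases hnc : 0 ≤ nc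
    · have hcast : nc = ((nc.toNat : Nat) : Int) := (Int.toNat_of_nonneg hnc).symm
      rw [hcast, PySem.List.pyRange_zero_natCast, List.map_map]
      apply List.ext_getElem
      · simp [hC.1]
      · intro b h1 h2
        have hb : b < nc.toNat := by simpa [hC.1] using h1
        have := hC.2.2.1 b hb
        have hgd : img.getD b (-1) = img[b] := by
          simp [List.getD, List.getElem?_eq_getElem h1]
        rw [hgd] at this
        simp only [List.getElem_map, List.getElem_range, Function.comp]
        rw [← this]
    · have hn0 : nc.toNat = 0 := by omega
      have himg : img = [] := List.eq_nil_of_length_eq_zero (hC.1.trans hn0)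
      rw [himg, pyRange_neg nc hnc]
      simp
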